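-- pv_equiv track=rewrite | github.com/joelgibson/advent_of_code_2023 | 1.py | solve
-- ===== SOURCE A (Python) =====
-- def solve(line: str, nums: dict[str, int]) -> int:
--     digits = [
--         num
--         for i in range(len(line))
--         for word, num in nums.items()
--         if line[i:].startswith(word)
--     ]
--     return 10 * digits[0] + digits[-1]
-- ===== SOURCE B (Python) =====
-- def solve(line: str, nums: dict[str, int]) -> int:
--     items = list(nums.items())
--     n = len(line)
--     first = next(num for i in range(n) for w, num in items if line.startswith(w, i))
--     last = next(num for i in range(n - 1, -1, -1) for w, num in reversed(items) if line.startswith(w, i))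
--     return 10 * first + last
-- ===== Notes on version B (the rewrite author's own statement) =====
-- stated objective: alternative
-- what changed: Instead of materialising the full list of matches over all positions and indexing its ends, B does two directed scans with early exit: forward over positions (items in order) for the first digit, backward over positions (items in reverse order) for the last.
import Mathlib
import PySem

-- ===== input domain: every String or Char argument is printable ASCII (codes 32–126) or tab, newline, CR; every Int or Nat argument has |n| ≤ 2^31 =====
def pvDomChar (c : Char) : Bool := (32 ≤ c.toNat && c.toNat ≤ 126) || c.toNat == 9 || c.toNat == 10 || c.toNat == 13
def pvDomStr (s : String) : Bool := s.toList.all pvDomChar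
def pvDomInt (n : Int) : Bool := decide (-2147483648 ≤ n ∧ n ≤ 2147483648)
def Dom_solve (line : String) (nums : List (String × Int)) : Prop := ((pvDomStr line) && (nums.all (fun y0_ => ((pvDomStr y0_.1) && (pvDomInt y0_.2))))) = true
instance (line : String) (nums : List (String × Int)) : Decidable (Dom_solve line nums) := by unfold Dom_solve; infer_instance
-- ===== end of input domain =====

-- B finds the first and the last digit by two directed scans instead of materialising the whole match list (simpler/alternative decomposition).

-- ===== PORT A =====
-- line[i:] on char lists is List.drop i (exact: PySem.List.slice_from_natCast);
-- nums.items() is the dict's insertion-ordered pair list (PySem.Dict.ofList dedups like Python's dict construction).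
def solve (line : String) (nums : List (String × Int)) : Int :=
  let items := (PySem.Dict.ofList nums).items
  let cs := line.toList
  let digits :=
    (List.range cs.length).foldl
      (fun acc i =>
        items.foldl
          (fun acc2 p =>
            if PySem.Chars.startswith (cs.drop i) p.1.toList then acc2 ++ [p.2] else acc2)
          acc)
      []
  10 * PySem.List.pyGetD digits 0 0 + PySem.List.pyGetD digits (-1) 0

-- ===== PORT B =====
-- line.startswith(w, i) is (exactly) startswith on the list dropped at i.
def solveAltMatch (cs : List Char) (items : List (String × Int)) (i : Nat) : Option Int :=
  items.findSome? (fun p => if PySem.Chars.startswith (cs.drop i) p.1.toList then some p.2 else none)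

def solve_alt (line : String) (nums : List (String × Int)) : Int :=
  let items := (PySem.Dict.ofList nums).items
  let cs := line.toList
  let first := (List.range cs.length).findSome? (fun i => solveAltMatch cs items i)
  let last := (List.range cs.length).reverse.findSome? (fun i => solveAltMatch cs items.reverse i)
  10 * first.getD 0 + last.getD 0

-- ===== PRECONDITION & SPEC =====
-- Pre_ excludes exactly the inputs where no dict word matches anywhere in the line: there A raises IndexError.
def Pre_solve (line : String) (nums : List (String × Int)) : Prop :=
  ((List.range line.toList.length).any (fun i =>
    ((PySem.Dict.ofList nums).items).any (fun p =>
      PySem.Chars.startswith (line.toList.drop i) p.1.toList))) = true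
instance (line : String) (nums : List (String × Int)) : Decidable (Pre_solve line nums) := by
  unfold Pre_solve; infer_instance
def pvWitness_solve : String × (List (String × Int)) := ("a1", [("1", 1)])
def Spec_solve (line : String) (nums : List (String × Int)) (out : Int) : Prop := out = solve_alt line nums
instance (line : String) (nums : List (String × Int)) (out : Int) : Decidable (Spec_solve line nums out) := by unfold Spec_solve; infer_instance

-- ===== CLAIM (what is proved, stated in full; the proofs are below) =====
def Claim_equal_solve : Prop := ∀ (line : String) (nums : List (String × Int)), Dom_solve line nums → Pre_solve line nums → Spec_solve line nums (solve line nums)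

-- ===== LEMMAS AND PROOFS =====

theorem head?_flatMap {α β : Type} (f : α → List β) (xs : List α) :
    (xs.flatMap f).head? = xs.findSome? (fun x => (f x).head?) := by
  induction xs with
  | nil => rfl
  | cons a t ih =>
    simp only [List.flatMap_cons, List.head?_append, List.findSome?_cons]
    cases h : (f a).head? with
    | none => simpa [h] using ih
    | some b => simp

theorem head?_filterMap {α β : Type} (g : α → Option β) (xs : List α) :
    (xs.filterMap g).head? = xs.findSome? g := by
  induction xs with
  | nil => rfl
  | cons a t ih =>
    simp only [List.filterMap_cons, List.findSome?_cons]
    cases h : g a with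
    | none => simp [ih]
    | some b => simp

theorem getLast?_flatMap {α β : Type} (f : α → List β) (xs : List α) :
    (xs.flatMap f).getLast? = xs.reverse.findSome? (fun x => (f x).getLast?) := by
  rw [← List.head?_reverse, List.reverse_flatMap, head?_flatMap]
  simp [List.head?_reverse]

theorem getLast?_filterMap {α β : Type} (g : α → Option β) (xs : List α) :
    (xs.filterMap g).getLast? = xs.reverse.findSome? g := by
  rw [← List.head?_reverse, ← List.filterMap_reverse, head?_filterMap]

theorem digits_eq_flatMap (cs : List Char) (items : List (String × Int)) :
    (List.range cs.length).foldl
      (fun acc i =>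
        items.foldl
          (fun acc2 p =>
            if PySem.Chars.startswith (cs.drop i) p.1.toList then acc2 ++ [p.2] else acc2)
          acc)
      []
    = (List.range cs.length).flatMap
        (fun i => items.filterMap
          (fun p => if PySem.Chars.startswith (cs.drop i) p.1.toList then some p.2 else none)) := by
  have inner : ∀ (i : Nat) (acc : List Int),
      items.foldl
        (fun acc2 p =>
          if PySem.Chars.startswith (cs.drop i) p.1.toList then acc2 ++ [p.2] else acc2)
        acc
      = acc ++ items.filterMap
          (fun p => if PySem.Chars.startswith (cs.drop i) p.1.toList then some p.2 else none) := by
    intro i acc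
    induction items generalizing acc with
    | nil => simp
    | cons a t ih =>
      by_cases h : PySem.Chars.startswith (cs.drop i) a.1.toList <;>
        simp [h, ih]
  have outer : ∀ (rng : List Nat) (acc : List Int),
      rng.foldl
        (fun acc i =>
          items.foldl
            (fun acc2 p =>
              if PySem.Chars.startswith (cs.drop i) p.1.toList then acc2 ++ [p.2] else acc2)
            acc)
        acc
      = acc ++ rng.flatMap
          (fun i => items.filterMap
            (fun p => if PySem.Chars.startswith (cs.drop i) p.1.toList then some p.2 else none)) := by
    intro rng
    induction rng with
    | nil => simp
    | cons i t ih =>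
      intro acc
      rw [List.foldl_cons, inner, ih, List.flatMap_cons, List.append_assoc]
  simpa using outer (List.range cs.length) []

-- ===== VERDICT (by name: the statement is the Claim_ definition above) =====
theorem solve_spec : Claim_equal_solve := by
  intro line nums _ hpre
  unfold Spec_solve solve solve_alt
  set items := (PySem.Dict.ofList nums).items with hitems
  set cs := line.toList with hcs
  set g : Nat → String × Int → Option Int :=
    fun i p => if PySem.Chars.startswith (cs.drop i) p.1.toList then some p.2 else none with hg
  simp only
  rw [digits_eq_flatMap]
  set digits := (List.range cs.length).flatMap (fun i => items.filterMap (g i)) with hd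
  have hne : digits ≠ [] := by
    unfold Pre_solve at hpre
    simp only [List.any_eq_true] at hpre
    obtain ⟨i, hi, p, hp, hmatch⟩ := hpre
    have : p.2 ∈ digits := by
      rw [hd]
      refine List.mem_flatMap.mpr ⟨i, hi, ?_⟩
      exact List.mem_filterMap.mpr ⟨p, hp, by simp [hg, hcs, hmatch]⟩
    exact List.ne_nil_of_mem this
  have h1 : digits.head? = (List.range cs.length).findSome? (fun i => solveAltMatch cs items i) := by
    rw [hd, head?_flatMap]
    congr 1
    funext i
    rw [head?_filterMap]
    rfl
  have h2 : digits.getLast? = (List.range cs.length).reverse.findSome? (fun i => solveAltMatch cs items.reverse i) := by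
    rw [hd, getLast?_flatMap]
    congr 1
    funext i
    rw [getLast?_filterMap]
    rfl
  have hA0 : PySem.List.pyGetD digits 0 0 = digits.head?.getD 0 := by
    obtain ⟨a, t, hat⟩ := List.exists_cons_of_ne_nil hne
    rw [hat]
    simp [PySem.List.pyGetD_zero_cons]
  have hA1 : PySem.List.pyGetD digits (-1) 0 = digits.getLast?.getD 0 := by
    rw [PySem.List.pyGetD_neg_one digits 0 hne, List.getLast?_eq_some_getLast hne]
    rfl
  rw [hA0, hA1, h1, h2]
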